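-- pv_equiv track=rewrite | github.com/medvedevgroup/mutation-rate-intervals | mutation_model_simulator.py | count_mutated_kmers_linear
-- ===== SOURCE A (Python) =====
-- def count_mutated_kmers_linear(kmerSize,errorSeq):
-- 	nMutated = 0
-- 	errorsInKmer = 0
-- 	for pos in range(len(errorSeq)+1):
-- 		# invariant: errorsInKmer is sum of errorSeq pos-kmerSize through pos-1
-- 		if (pos >= kmerSize):
-- 			if (errorsInKmer > 0): nMutated += 1   # pos-kmerSize is 'mutated'
-- 			errorsInKmer -= errorSeq[pos-kmerSize]
-- 		if (pos == len(errorSeq)): break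
-- 		errorsInKmer += errorSeq[pos]
-- 	return nMutated
-- ===== SOURCE B (Python) =====
-- def count_mutated_kmers_linear(kmerSize, errorSeq):
--     Pr = [0]
--     for e in errorSeq:
--         Pr.append(Pr[-1] + e)
--     nMutated = 0
--     for j in range(len(errorSeq) - kmerSize + 1):
--         if Pr[j + kmerSize] - Pr[j] > 0:
--             nMutated += 1
--     return nMutated
-- ===== Notes on version B (the rewrite author's own statement) =====
-- stated objective: alternative
-- what changed: Replaced A's single stateful pass that slides a window by incrementally adding and subtracting elements with a precomputed prefix-sum table followed by an independent indexed pass testing each window's sum Pr[j+k]-Pr[j] > 0.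
import Mathlib
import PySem

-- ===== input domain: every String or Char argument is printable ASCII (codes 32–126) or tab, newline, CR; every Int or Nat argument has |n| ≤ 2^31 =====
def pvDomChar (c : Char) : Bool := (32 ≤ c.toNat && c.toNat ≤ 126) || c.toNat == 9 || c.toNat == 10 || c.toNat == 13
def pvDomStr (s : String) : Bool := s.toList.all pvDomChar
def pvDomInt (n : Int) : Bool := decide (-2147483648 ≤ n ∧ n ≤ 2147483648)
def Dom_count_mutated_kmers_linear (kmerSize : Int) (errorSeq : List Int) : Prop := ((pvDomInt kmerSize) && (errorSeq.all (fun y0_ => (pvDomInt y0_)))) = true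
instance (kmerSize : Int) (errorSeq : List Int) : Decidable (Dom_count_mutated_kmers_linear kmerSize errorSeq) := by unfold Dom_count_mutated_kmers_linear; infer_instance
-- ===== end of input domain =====

-- B replaces A's incremental add/subtract sliding-window accumulator by a precomputed
-- prefix-sum table with an independent indexed window pass (objective: alternative, same O(n) cost).

-- ===== PORT A =====
-- Python's 'break' fires only at pos = len(errorSeq), which is the final iteration of
-- range(len(errorSeq)+1): the break merely skips that iteration's trailing addition,
-- which the 'if pos = len' branch below reproduces exactly.
def count_mutated_kmers_linear (kmerSize : Int) (errorSeq : List Int) : Int :=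
  ((PySem.List.pyRange 0 ((errorSeq.length : Int) + 1) 1).foldl
    (fun s pos =>
      let s1 := if pos ≥ kmerSize then
          ((if s.2 > 0 then s.1 + 1 else s.1), s.2 - PySem.List.pyGetD errorSeq (pos - kmerSize) 0)
        else s
      if pos = (errorSeq.length : Int) then s1
      else (s1.1, s1.2 + PySem.List.pyGetD errorSeq pos 0))
    (0, 0)).1

-- ===== PORT B =====
def count_mutated_kmers_linear_alt (kmerSize : Int) (errorSeq : List Int) : Int :=
  let Pr : List Int := errorSeq.foldl (fun a e => a ++ [PySem.List.pyGetD a (-1) 0 + e]) [0]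
  (PySem.List.pyRange 0 ((errorSeq.length : Int) - kmerSize + 1) 1).foldl
    (fun c j => if PySem.List.pyGetD Pr (j + kmerSize) 0 - PySem.List.pyGetD Pr j 0 > 0
                then c + 1 else c) 0

-- ===== PRECONDITION & SPEC =====
-- Pre_ excludes kmerSize ≤ 0, on which Python A always raises IndexError
-- (errorSeq[pos-kmerSize] runs past the end of the list).
def Pre_count_mutated_kmers_linear (kmerSize : Int) (errorSeq : List Int) : Prop := 1 ≤ kmerSize
instance (kmerSize : Int) (errorSeq : List Int) : Decidable (Pre_count_mutated_kmers_linear kmerSize errorSeq) := by unfold Pre_count_mutated_kmers_linear; infer_instance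
def pvWitness_count_mutated_kmers_linear : Int × List Int := (2, [0, 1, 0])

def Spec_count_mutated_kmers_linear (kmerSize : Int) (errorSeq : List Int) (out : Int) : Prop := out = count_mutated_kmers_linear_alt kmerSize errorSeq
instance (kmerSize : Int) (errorSeq : List Int) (out : Int) : Decidable (Spec_count_mutated_kmers_linear kmerSize errorSeq out) := by unfold Spec_count_mutated_kmers_linear; infer_instance

-- ===== CLAIM (what is proved, stated in full; the proofs are below) =====
def Claim_equal_count_mutated_kmers_linear : Prop := ∀ (kmerSize : Int) (errorSeq : List Int), Dom_count_mutated_kmers_linear kmerSize errorSeq → Pre_count_mutated_kmers_linear kmerSize errorSeq → Spec_count_mutated_kmers_linear kmerSize errorSeq (count_mutated_kmers_linear kmerSize errorSeq)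

-- ===== LEMMAS AND PROOFS =====

-- Both sides count the j with 0 < (take (j+kt)).sum - (take j).sum, j ranging over range (n+1-kt).

theorem A_loop (k : Int) (es : List Int) (kt : Nat) (hk : k = (kt : Int)) (hk1 : 1 ≤ kt)
    (m : Nat) (hm : m ≤ es.length) :
    (PySem.List.pyRange 0 (m : Int) 1).foldl
      (fun s pos =>
        let s1 := if pos ≥ k then
            ((if s.2 > 0 then s.1 + 1 else s.1), s.2 - PySem.List.pyGetD es (pos - k) 0)
          else s
        if pos = (es.length : Int) then s1
        else (s1.1, s1.2 + PySem.List.pyGetD es pos 0))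
      (0, 0)
    = (((List.range (m - kt)).countP
          (fun j => decide (0 < (es.take (j + kt)).sum - (es.take j).sum)) : Int),
       (es.take m).sum - (es.take (m - kt)).sum) := by
  subst hk
  induction m with
  | zero => simp [PySem.List.pyRange_one_eq_nil]
  | succ m ih =>
    have hmle : m ≤ es.length := by omega
    have hmlt : m < es.length := by omega
    have hcast : ((m + 1 : Nat) : Int) = (m : Int) + 1 := by push_cast; ring
    rw [hcast, PySem.List.pyRange_one_succ_right (by positivity), List.foldl_append, ih hmle]
    simp only [List.foldl_cons, List.foldl_nil]
    have hne : ((m : Int)) ≠ (es.length : Int) := by omega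
    rw [if_neg hne]
    by_cases hcase : kt ≤ m
    · rw [if_pos (show (m : Int) ≥ (kt : Int) by omega)]
      have hidx : (m : Int) - (kt : Int) = ((m - kt : Nat) : Int) := by omega
      rw [hidx, PySem.List.pyGetD_natCast, PySem.List.pyGetD_natCast]
      have h1 : m - kt < es.length := by omega
      rw [List.getD_eq_getElem es 0 h1, List.getD_eq_getElem es 0 hmlt]
      have hr : m + 1 - kt = (m - kt) + 1 := by omega
      rw [hr, List.range_succ, List.countP_append]
      have hmk : m - kt + kt = m := by omega
      simp only [List.countP_cons, List.countP_nil, hmk]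
      rw [Prod.mk.injEq]
      constructor
      · by_cases hpos : 0 < (es.take m).sum - (es.take (m - kt)).sum
        · rw [if_pos hpos]; simp only [hpos, decide_true, if_pos]; push_cast; ring
        · rw [if_neg hpos]; simp only [hpos, decide_false]; simp
      · rw [List.sum_take_succ es m hmlt, List.sum_take_succ es (m - kt) h1]
        ring
    · rw [if_neg (show ¬ ((m : Int) ≥ (kt : Int)) by omega)]
      have h0 : m - kt = 0 := by omega
      have h0' : m + 1 - kt = 0 := by omega
      simp only [h0, h0']
      rw [PySem.List.pyGetD_natCast, List.getD_eq_getElem es 0 hmlt, Prod.mk.injEq]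
      constructor
      · rfl
      · rw [List.sum_take_succ es m hmlt]; ring

theorem A_char (k : Int) (es : List Int) (kt : Nat) (hk : k = (kt : Int)) (hk1 : 1 ≤ kt) :
    count_mutated_kmers_linear k es
    = (((List.range (es.length + 1 - kt)).countP
          (fun j => decide (0 < (es.take (j + kt)).sum - (es.take j).sum)) : Int)) := by
  unfold count_mutated_kmers_linear
  rw [PySem.List.pyRange_one_succ_right (by positivity), List.foldl_append,
      A_loop k es kt hk hk1 es.length le_rfl]
  simp only [List.foldl_cons, List.foldl_nil]
  subst hk
  by_cases hcase : kt ≤ es.length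
  · rw [if_pos (show (es.length : Int) ≥ (kt : Int) by omega)]
    have hr : es.length + 1 - kt = (es.length - kt) + 1 := by omega
    rw [hr, List.range_succ, List.countP_append]
    have hmk : es.length - kt + kt = es.length := by omega
    simp only [List.countP_cons, List.countP_nil, hmk]
    by_cases hpos : 0 < (es.take es.length).sum - (es.take (es.length - kt)).sum
    · rw [if_pos hpos]; simp only [hpos, decide_true, if_pos]; push_cast; ring
    · rw [if_neg hpos]; simp only [hpos, decide_false]; simp
  · rw [if_neg (show ¬ ((es.length : Int) ≥ (kt : Int)) by omega)]
    have h0 : es.length - kt = 0 := by omega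
    have h0' : es.length + 1 - kt = 0 := by omega
    simp [h0, h0']

theorem Pr_gen (l : List Int) : ∀ (acc : List Int) (x : Int),
    l.foldl (fun a e => a ++ [PySem.List.pyGetD a (-1) 0 + e]) (acc ++ [x])
    = (acc ++ [x]) ++ (List.range l.length).map (fun i => x + (l.take (i + 1)).sum) := by
  induction l with
  | nil => simp
  | cons e t ih =>
    intro acc x
    simp only [List.foldl_cons, PySem.List.pyGetD_neg_one_append_singleton]
    rw [show (acc ++ [x]) ++ [x + e] = (acc ++ [x]) ++ [x + e] from rfl]
    rw [show acc ++ [x] ++ [x + e] = (acc ++ [x]) ++ [x + e] from rfl, ih (acc ++ [x]) (x + e)]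
    rw [List.length_cons, List.range_succ_eq_map]
    simp only [List.map_cons, List.map_map, List.append_assoc, List.singleton_append]
    congr 2
    · simp
      intro a _
      ring

theorem Pr_spec (es : List Int) :
    es.foldl (fun a e => a ++ [PySem.List.pyGetD a (-1) 0 + e]) [0]
    = (List.range (es.length + 1)).map (fun i => (es.take i).sum) := by
  rw [show ([0] : List Int) = [] ++ [0] from rfl, Pr_gen es [] 0]
  rw [List.range_succ_eq_map]
  simp [Function.comp]

theorem B_char (k : Int) (es : List Int) (kt : Nat) (hk : k = (kt : Int)) (hk1 : 1 ≤ kt) :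
    count_mutated_kmers_linear_alt k es
    = (((List.range (es.length + 1 - kt)).countP
          (fun j => decide (0 < (es.take (j + kt)).sum - (es.take j).sum)) : Int)) := by
  unfold count_mutated_kmers_linear_alt
  simp only [Pr_spec]
  rw [PySem.List.pyRange_one]
  rw [List.foldl_map]
  have hlen : ((es.length : Int) - k + 1 - 0).toNat = es.length + 1 - kt := by omega
  rw [hlen]
  have key : ∀ (j : Nat), j ∈ List.range (es.length + 1 - kt) → ∀ (c : Int),
      (if PySem.List.pyGetD ((List.range (es.length + 1)).map (fun i => (es.take i).sum)) ((0 : Int) + (j : Int) + k) 0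
          - PySem.List.pyGetD ((List.range (es.length + 1)).map (fun i => (es.take i).sum)) ((0 : Int) + (j : Int)) 0 > 0
       then c + 1 else c)
      = (if 0 < (es.take (j + kt)).sum - (es.take j).sum then c + 1 else c) := by
    intro j hj c
    rw [List.mem_range] at hj
    have e1 : (0 : Int) + (j : Int) + k = ((j + kt : Nat) : Int) := by omega
    have e2 : (0 : Int) + (j : Int) = ((j : Nat) : Int) := by omega
    rw [e1, e2, PySem.List.pyGetD_natCast, PySem.List.pyGetD_natCast]
    have h1 : j + kt < ((List.range (es.length + 1)).map (fun i => (es.take i).sum)).length := by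
      simp; omega
    have h2 : j < ((List.range (es.length + 1)).map (fun i => (es.take i).sum)).length := by
      simp; omega
    rw [List.getD_eq_getElem _ 0 h1, List.getD_eq_getElem _ 0 h2]
    simp only [List.getElem_map, List.getElem_range]
  rw [List.foldl_ext _
        (fun (c : Int) (j : Nat) =>
          if 0 < (es.take (j + kt)).sum - (es.take j).sum then c + 1 else c) 0
        (fun c j hj => key j hj c)]
  rw [PySem.List.foldl_ite_add_one]
  simp

-- ===== VERDICT (by name: the statement is the Claim_ definition above) =====
theorem count_mutated_kmers_linear_spec : Claim_equal_count_mutated_kmers_linear := by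
  intro k es _ hpre
  unfold Pre_count_mutated_kmers_linear at hpre
  unfold Spec_count_mutated_kmers_linear
  have hk1 : 1 ≤ k.toNat := by omega
  have hk : k = (k.toNat : Int) := by omega
  rw [A_char k es k.toNat hk hk1, B_char k es k.toNat hk hk1]
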